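-- pv_equiv track=rewrite | github.com/Phonsiriwillbejommarn/The-Weather-Theme | prepare_thai_data.py | pack_into_blocks
-- ===== SOURCE A (Python) =====
-- from typing import Iterator
--
-- def pack_into_blocks(
--     token_stream: Iterator[list[int]],
--     block_size: int,
--     eos_id: int,
-- ) -> Iterator[dict]:
--     """
--     Concatenate token lists and slice into fixed-length blocks.
--     The last partial block is discarded (avoids padding).
--     Each block is yielded as {"input_ids": [...], "labels": [...]}.
--     Labels == input_ids shifted by 1 (causal LM).
--     """
--     buf: list[int] = []
--     for ids in token_stream:
--         buf.extend(ids)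
--         buf.append(eos_id)            # document boundary
--
--         while len(buf) >= block_size + 1:
--             chunk = buf[: block_size + 1]
--             buf   = buf[block_size:]
--             yield {
--                 "input_ids": chunk[:-1],
--                 "labels":    chunk[1:],
--             }
-- ===== SOURCE B (Python) =====
-- def pack_into_blocks(token_stream, block_size, eos_id):
--     # Stage 1: materialise the whole corpus as one flat token list.
--     flat = [t for ids in token_stream for t in (*ids, eos_id)]
--     if not flat:
--         return []
--     # Stage 2: the number of full (block_size+1)-windows at stride block_size,
--     # then read each block directly by index arithmetic.
--     n_blocks = (len(flat) - 1) // block_size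
--     return [{"input_ids": flat[i * block_size : (i + 1) * block_size],
--              "labels":    flat[i * block_size + 1 : (i + 1) * block_size + 1]}
--             for i in range(n_blocks)]
-- ===== Notes on version B (the rewrite author's own statement) =====
-- stated objective: alternative
-- what changed: B replaces A's stateful buffer with an inner while-loop by two stages: it first materialises the whole flat token list (docs joined with eos), then computes the block count in closed form ((len-1)//block_size) and reads every block directly by index-arithmetic slices.
import Mathlib
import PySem

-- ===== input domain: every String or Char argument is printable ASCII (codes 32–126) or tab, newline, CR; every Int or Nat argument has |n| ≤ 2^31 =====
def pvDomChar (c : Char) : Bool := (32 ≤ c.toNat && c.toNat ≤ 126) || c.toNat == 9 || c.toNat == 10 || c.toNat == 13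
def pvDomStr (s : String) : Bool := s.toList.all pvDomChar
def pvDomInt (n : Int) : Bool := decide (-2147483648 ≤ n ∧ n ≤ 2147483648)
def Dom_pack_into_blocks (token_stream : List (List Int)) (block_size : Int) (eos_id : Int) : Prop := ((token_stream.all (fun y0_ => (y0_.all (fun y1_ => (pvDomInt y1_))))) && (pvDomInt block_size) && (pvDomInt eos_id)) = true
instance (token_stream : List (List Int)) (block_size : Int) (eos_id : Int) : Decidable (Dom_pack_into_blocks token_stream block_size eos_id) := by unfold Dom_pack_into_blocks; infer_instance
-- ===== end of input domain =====

-- B first materialises the flat token list, computes the block count in closed form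
-- ((len-1)//block_size) and reads each block by index arithmetic, instead of A's
-- stateful buffer with an inner while-loop; return values proved equal on Pre_.

-- ===== PORT A =====
-- A's inner `while len(buf) >= block_size + 1` loop.  The extra `1 ≤ bs` conjunct is a
-- totality guard only: when block_size ≤ 0 and the condition holds, the Python loop never
-- terminates, so no input admitted by Pre_ reaches that case.  Inside the branch bs ≥ 1,
-- so buf[: bs+1] = take (bs+1).toNat and buf[bs:] = drop bs.toNat exactly;
-- chunk[:-1] = dropLast and chunk[1:] = tail exactly on any list.
def packA_inner (bs : Int) (buf : List Int) : List (List (String × List Int)) × List Int :=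
  if h : 1 ≤ bs ∧ bs + 1 ≤ (buf.length : Int) then
    let chunk := buf.take (bs + 1).toNat
    let rest := packA_inner bs (buf.drop bs.toNat)
    ([("input_ids", chunk.dropLast), ("labels", chunk.tail)] :: rest.1, rest.2)
  else ([], buf)
termination_by buf.length
decreasing_by
  simp [List.length_drop]; omega

def pack_into_blocks (token_stream : List (List Int)) (block_size : Int) (eos_id : Int) : List (List (String × List Int)) :=
  (token_stream.foldl
    (fun st ids =>
      let buf := st.2 ++ ids ++ [eos_id]
      let r := packA_inner block_size buf
      (st.1 ++ r.1, r.2))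
    ([], [])).1

-- ===== PORT B =====
-- Source B: flat = [t for ids in token_stream for t in (*ids, eos_id)]; if not flat: [];
-- n_blocks = (len(flat)-1)//block_size; blocks read by slices at i*block_size.
def pack_into_blocks_alt (token_stream : List (List Int)) (block_size : Int) (eos_id : Int) : List (List (String × List Int)) :=
  let flat := token_stream.flatMap (fun ids => ids ++ [eos_id])
  if flat = [] then []
  else
    let n_blocks := PySem.Int.floordiv ((flat.length : Int) - 1) block_size
    (PySem.List.pyRange 0 n_blocks 1).map (fun i =>
      [("input_ids", PySem.List.slice flat (some (i * block_size)) (some ((i + 1) * block_size))),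
       ("labels", PySem.List.slice flat (some (i * block_size + 1)) (some ((i + 1) * block_size + 1)))])

-- ===== PRECONDITION & SPEC =====
-- Pre_ excludes only inputs on which A never returns: for block_size ≤ 0 with a nonempty
-- stream, A's `while` loop does not shrink the buffer and the Python generator diverges.
def Pre_pack_into_blocks (token_stream : List (List Int)) (block_size : Int) (eos_id : Int) : Prop :=
  1 ≤ block_size ∨ token_stream = []
instance (token_stream : List (List Int)) (block_size : Int) (eos_id : Int) : Decidable (Pre_pack_into_blocks token_stream block_size eos_id) := by unfold Pre_pack_into_blocks; infer_instance
def pvWitness_pack_into_blocks : List (List Int) × Int × Int := ([[1, 2, 3], [4]], 2, 0)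

def Spec_pack_into_blocks (token_stream : List (List Int)) (block_size : Int) (eos_id : Int) (out : List (List (String × List Int))) : Prop := out = pack_into_blocks_alt token_stream block_size eos_id
instance (token_stream : List (List Int)) (block_size : Int) (eos_id : Int) (out : List (List (String × List Int))) : Decidable (Spec_pack_into_blocks token_stream block_size eos_id out) := by unfold Spec_pack_into_blocks; infer_instance

-- ===== CLAIM (what is proved, stated in full; the proofs are below) =====
def Claim_equal_pack_into_blocks : Prop := ∀ (token_stream : List (List Int)) (block_size : Int) (eos_id : Int), Dom_pack_into_blocks token_stream block_size eos_id → Pre_pack_into_blocks token_stream block_size eos_id → Spec_pack_into_blocks token_stream block_size eos_id (pack_into_blocks token_stream block_size eos_id)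

-- ===== LEMMAS AND PROOFS =====

-- proof-side vocabulary: the i-th block of a flat list, and all full blocks.
def blockFn (b : Nat) (l : List Int) (i : Nat) : List (String × List Int) :=
  [("input_ids", (l.drop (i * b)).take b), ("labels", ((l.drop (i * b)).drop 1).take b)]
def blocks (b : Nat) (l : List Int) : List (List (String × List Int)) :=
  (List.range ((l.length - 1) / b)).map (blockFn b l)

lemma take_succ_dropLast (l : List Int) (n : Nat) (h : n + 1 ≤ l.length) :
    (l.take (n + 1)).dropLast = l.take n := by
  rw [List.dropLast_eq_take, List.take_take, List.length_take]
  congr 1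
  omega

lemma take_succ_tail (l : List Int) (n : Nat) : (l.take (n + 1)).tail = (l.drop 1).take n := by
  rw [← List.drop_one, List.drop_take]
  simp

lemma blockFn_succ (b : Nat) (l : List Int) (i : Nat) :
    blockFn b (l.drop b) i = blockFn b l (i + 1) := by
  simp only [blockFn, List.drop_drop]
  rw [show b + i * b = (i + 1) * b from by ring]

lemma inner_char (bs : Int) (hbs : 1 ≤ bs) (buf : List Int) :
    packA_inner bs buf =
      (blocks bs.toNat buf, buf.drop (((buf.length - 1) / bs.toNat) * bs.toNat)) := by
  fun_induction packA_inner bs buf with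
  | case1 buf h chunk rest ih =>
    set b := bs.toNat with hb
    have hb1 : 1 ≤ b := by omega
    have hlen : b + 1 ≤ buf.length := by omega
    have hk : (buf.length - 1) / b = ((buf.drop b).length - 1) / b + 1 := by
      have : buf.length - 1 = (buf.length - 1 - b) + b := by omega
      rw [this, Nat.add_div_right _ (by omega)]
      simp [List.length_drop]
      congr 1; omega
    have hchunk : chunk = buf.take (b + 1) := by
      show buf.take (bs + 1).toNat = _
      congr 1; omega
    have hrest : rest = packA_inner bs (buf.drop b) := rfl
    rw [hrest, ih]
    simp only [Prod.mk.injEq]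
    refine ⟨?_, ?_⟩
    · rw [blocks, blocks, hk, List.range_succ_eq_map, List.map_cons, List.map_map]
      congr 1
      · simp only [blockFn, Nat.zero_mul, List.drop_zero, hchunk,
          take_succ_dropLast buf b hlen, take_succ_tail]
      · apply List.map_congr_left
        intro i _
        simp only [Function.comp]
        rw [blockFn_succ]
    · rw [List.drop_drop, hk]
      congr 1
      ring
  | case2 buf h =>
    have : ¬ (bs + 1 ≤ (buf.length : Int)) := by tauto
    have hlt : buf.length - 1 < bs.toNat := by omega
    simp [blocks, Nat.div_eq_of_lt hlt]

lemma blockFn_prefix (b : Nat) (l m : List Int) (i : Nat) (h : i * b + b + 1 ≤ l.length) :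
    blockFn b (l ++ m) i = blockFn b l i := by
  simp only [blockFn]
  rw [List.drop_append_of_le_length (by omega),
    List.take_append_of_le_length (by simp; omega),
    List.drop_append_of_le_length (by simp; omega),
    List.take_append_of_le_length (by simp; omega)]

lemma blockFn_shift (b : Nat) (l m : List Int) (k j : Nat) (h : k * b ≤ l.length) :
    blockFn b (l ++ m) (k + j) = blockFn b (l.drop (k * b) ++ m) j := by
  have e : (l ++ m).drop ((k + j) * b) = (l.drop (k * b) ++ m).drop (j * b) := by
    calc (l ++ m).drop ((k + j) * b) = ((l ++ m).drop (k * b)).drop (j * b) := by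
          rw [List.drop_drop]; congr 1; ring
    _ = (l.drop (k * b) ++ m).drop (j * b) := by rw [List.drop_append_of_le_length h]
  simp only [blockFn, e]

lemma blocks_split (b : Nat) (hb : 1 ≤ b) (l m : List Int) (hl : l ≠ []) :
    blocks b (l ++ m) =
      blocks b l ++ blocks b (l.drop (((l.length - 1) / b) * b) ++ m) := by
  have hL : 1 ≤ l.length := List.length_pos_iff.mpr hl
  set k := (l.length - 1) / b with hk
  have hkb : k * b ≤ l.length - 1 := by
    rw [hk]; exact Nat.div_mul_le_self _ _
  have hmod := Nat.div_add_mod (l.length - 1) b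
  have hmlt : (l.length - 1) % b < b := Nat.mod_lt _ (by omega)
  have hcount : ((l ++ m).length - 1) / b = k + ((l.drop (k * b) ++ m).length - 1) / b := by
    have e1 : (l ++ m).length - 1 = ((l.drop (k * b) ++ m).length - 1) + k * b := by
      simp; omega
    rw [e1, Nat.add_mul_div_right _ _ (by omega : 0 < b)]
    ring
  rw [blocks, hcount, List.range_add, List.map_append, List.map_map]
  congr 1
  · rw [blocks]
    apply List.map_congr_left
    intro i hi
    simp only [List.mem_range] at hi
    have h1 : (i + 1) * b ≤ k * b := Nat.mul_le_mul_right b (by omega)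
    have h2 : (i + 1) * b = i * b + b := by ring
    exact blockFn_prefix b l m i (by omega)
  · rw [blocks]
    apply List.map_congr_left
    intro j _
    simp only [Function.comp]
    exact blockFn_shift b l m k j (by omega)

lemma blocks_short (b : Nat) (hb : 1 ≤ b) (l : List Int) (h : l.length ≤ b) :
    blocks b l = [] := by
  simp [blocks, Nat.div_eq_of_lt (by omega : l.length - 1 < b)]

lemma outer (bs eos : Int) (hbs : 1 ≤ bs) :
    ∀ (docs : List (List Int)) (out : List (List (String × List Int))) (buf : List Int),
      buf.length ≤ bs.toNat →
      (docs.foldl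
        (fun st ids =>
          let b := st.2 ++ ids ++ [eos]
          let r := packA_inner bs b
          (st.1 ++ r.1, r.2)) (out, buf)).1 =
      out ++ blocks bs.toNat (buf ++ docs.flatMap (fun ids => ids ++ [eos])) := by
  intro docs
  induction docs with
  | nil =>
    intro out buf hlen
    simp [blocks_short bs.toNat (by omega) buf hlen]
  | cons ids docs ih =>
    intro out buf hlen
    set b := bs.toNat with hb
    simp only [List.foldl_cons]
    rw [inner_char bs hbs (buf ++ ids ++ [eos])]
    set buf1 := buf ++ ids ++ [eos] with hbuf1
    have hL1 : 1 ≤ buf1.length := by simp [hbuf1]; omega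
    set k1 := (buf1.length - 1) / b with hk1
    have hmod := Nat.div_add_mod (buf1.length - 1) b
    rw [← hk1] at hmod
    have hmlt : (buf1.length - 1) % b < b := Nat.mod_lt _ (by omega)
    have hcomm : k1 * b = b * k1 := by ring
    have hleft : (buf1.drop (k1 * b)).length ≤ b := by
      simp [List.length_drop]; omega
    rw [ih (out ++ blocks b buf1) (buf1.drop (k1 * b)) hleft]
    have hflat : buf ++ (ids :: docs).flatMap (fun ids => ids ++ [eos]) =
        buf1 ++ docs.flatMap (fun ids => ids ++ [eos]) := by
      simp [hbuf1]
    rw [hflat, blocks_split b (by omega) buf1 _ (by simp [hbuf1]), List.append_assoc]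

lemma alt_char (ts : List (List Int)) (bs eos : Int) (hbs : 1 ≤ bs) :
    pack_into_blocks_alt ts bs eos =
      blocks bs.toNat (ts.flatMap (fun ids => ids ++ [eos])) := by
  unfold pack_into_blocks_alt
  set flat := ts.flatMap (fun ids => ids ++ [eos]) with hflat
  by_cases hf : flat = []
  · simp [hf, blocks]
  · rw [if_neg hf]
    have hL : 1 ≤ flat.length := List.length_pos_iff.mpr hf
    have hbsn : bs = ((bs.toNat : Nat) : Int) := by omega
    set b := bs.toNat with hb
    have hn : PySem.Int.floordiv ((flat.length : Int) - 1) bs =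
        (((flat.length - 1) / b : Nat) : Int) := by
      rw [show ((flat.length : Int) - 1) = (((flat.length - 1 : Nat) : Nat) : Int) from by omega,
        hbsn, PySem.Int.floordiv_natCast]
    rw [hn]
    show List.map
        (fun i =>
          [("input_ids", PySem.List.slice flat (some (i * bs)) (some ((i + 1) * bs))),
            ("labels", PySem.List.slice flat (some (i * bs + 1)) (some ((i + 1) * bs + 1)))])
        (PySem.List.pyRange 0 (((flat.length - 1) / b : Nat) : Int) 1) = blocks b flat
    rw [PySem.List.pyRange_zero_nat, List.map_map, blocks]
    apply List.map_congr_left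
    intro k _
    simp only [Function.comp, blockFn]
    have e1 : (k : Int) * bs = ((k * b : Nat) : Int) := by rw [hbsn]; push_cast; ring
    have e2 : ((k : Int) + 1) * bs = ((k * b + b : Nat) : Int) := by rw [hbsn]; push_cast; ring
    have e3 : ((k * b : Nat) : Int) + 1 = ((k * b + 1 : Nat) : Int) := by push_cast; ring
    have e4 : ((k * b + b : Nat) : Int) + 1 = ((k * b + b + 1 : Nat) : Int) := by push_cast; ring
    rw [e1, e2, e3, e4, PySem.List.slice_natCast, PySem.List.slice_natCast, List.drop_drop]
    congr 3
    · omega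
    · congr 1
      omega

-- ===== VERDICT (by name: the statement is the Claim_ definition above) =====
theorem pack_into_blocks_spec : Claim_equal_pack_into_blocks := by
  intro ts bs eos _ hpre
  unfold Spec_pack_into_blocks
  rcases hpre with hbs | hnil
  · unfold pack_into_blocks
    rw [outer bs eos hbs ts [] [] (by simp), alt_char ts bs eos hbs]
    simp
  · subst hnil; rfl
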